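-- pv_equiv track=rewrite | github.com/fabrizziop/crypto-plus-steg | rel1-0-0.py | bytes_to_3_bit_chunks
-- ===== SOURCE A (Python) =====
-- bit_3_mask = 0b111
--
-- def big_endian_to_int(big_endian_barr):
-- 	big_endian = big_endian_barr
-- 	cur_num = 0
-- 	for i in range(0,len(big_endian)):
-- 		cur_num = (cur_num << 8) | big_endian[i]
-- 	return cur_num
--
-- def bytes_to_3_bit_chunks(bytearr):
-- 	des_int = big_endian_to_int(bytearr)
-- 	i_list = []
-- 	for i in range(0,8):
-- 		i_list.append(des_int & bit_3_mask)
-- 		des_int >>= 3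
-- 	i_list.reverse()
-- 	return i_list
-- ===== SOURCE B (Python) =====
-- def bytes_to_3_bit_chunks(bytearr):
-- 	des_int = 0
-- 	for b in bytearr:
-- 		des_int = (des_int << 8) | b
-- 	return [int(c) for c in format(des_int & 0xFFFFFF, '08o')]
-- ===== Notes on version B (the rewrite author's own statement) =====
-- stated objective: idiomatic
-- what changed: Instead of A's eight-step mask-and-shift loop into a list that is then reversed, B masks the accumulated integer to 24 bits once and formats it as a zero-padded 8-digit octal string, whose digits ARE the eight 3-bit chunks in MSB-first order.
import Mathlib
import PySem

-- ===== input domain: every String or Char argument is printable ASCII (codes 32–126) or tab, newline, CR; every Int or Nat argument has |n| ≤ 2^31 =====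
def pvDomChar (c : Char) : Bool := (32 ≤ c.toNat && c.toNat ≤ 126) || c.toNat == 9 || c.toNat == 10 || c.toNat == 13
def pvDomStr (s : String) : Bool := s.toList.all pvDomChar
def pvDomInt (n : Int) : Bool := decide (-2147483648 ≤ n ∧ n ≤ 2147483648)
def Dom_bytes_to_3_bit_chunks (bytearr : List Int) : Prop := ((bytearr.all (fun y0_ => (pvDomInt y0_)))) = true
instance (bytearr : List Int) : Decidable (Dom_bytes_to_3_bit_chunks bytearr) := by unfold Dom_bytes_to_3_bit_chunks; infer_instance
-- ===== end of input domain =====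

-- B replaces A's eight-step mask/shift loop plus list reverse by formatting the once-masked
-- 24-bit value as a zero-padded 8-digit octal string, whose digits are the chunks MSB-first (idiomatic; same O(n) cost).

-- ===== PORT A =====
-- for i in range(0,len(big_endian)): cur_num = (cur_num << 8) | big_endian[i]
-- (the loop reads the list elements in order; ported as the fold over the list in that order)
def big_endian_to_int (big_endian_barr : List Int) : Int :=
  big_endian_barr.foldl (fun cur_num b => PySem.Int.bor (cur_num <<< 8) b) 0

def bytes_to_3_bit_chunks (bytearr : List Int) : List Int :=
  let des_int := big_endian_to_int bytearr
  -- for i in range(0,8): i_list.append(des_int & 7); des_int >>= 3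
  let s := (PySem.List.pyRange 0 8 1).foldl
    (fun (s : List Int × Int) _ => (s.1 ++ [PySem.Int.band s.2 7], s.2 >>> (3:Nat))) ([], des_int)
  s.1.reverse

-- ===== PORT B =====
-- format(n, 'o') for n : Nat — octal digits, most significant first (hand port, exact for n ≥ 0)
def pvOctDigits (n : Nat) : List Char :=
  if h : n < 8 then [Char.ofNat (48 + n)]
  else pvOctDigits (n / 8) ++ [Char.ofNat (48 + n % 8)]
decreasing_by exact Nat.div_lt_self (by omega) (by omega)

-- format(n, '08o'): the octal digits zero-padded on the left to width 8
def pvOct8 (n : Nat) : List Char :=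
  List.replicate (8 - (pvOctDigits n).length) '0' ++ pvOctDigits n

def bytes_to_3_bit_chunks_alt (bytearr : List Int) : List Int :=
  let des_int := bytearr.foldl (fun c b => PySem.Int.bor (c <<< 8) b) 0
  -- des_int & 0xFFFFFF is nonnegative, so .toNat is exact; int(c) on an octal digit char is c.toNat - 48
  (pvOct8 (PySem.Int.band des_int 0xFFFFFF).toNat).map (fun c => ((c.toNat : Int) - 48))

-- ===== PRECONDITION & SPEC =====
def Spec_bytes_to_3_bit_chunks (bytearr : List Int) (out : List Int) : Prop := out = bytes_to_3_bit_chunks_alt bytearr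
instance (bytearr : List Int) (out : List Int) : Decidable (Spec_bytes_to_3_bit_chunks bytearr out) := by unfold Spec_bytes_to_3_bit_chunks; infer_instance

-- ===== CLAIM (what is proved, stated in full; the proofs are below) =====
def Claim_equal_bytes_to_3_bit_chunks : Prop := ∀ (bytearr : List Int), Dom_bytes_to_3_bit_chunks bytearr → Spec_bytes_to_3_bit_chunks bytearr (bytes_to_3_bit_chunks bytearr)

-- ===== LEMMAS AND PROOFS =====

-- Python a & 7 is a % 8 (two's-complement & against a low mask)
theorem pv_band_seven (a : Int) : PySem.Int.band a 7 = a % 8 := by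
  have h7 : ∀ m : Nat, m &&& 7 = m % 8 := fun m => by
    have := Nat.and_two_pow_sub_one_eq_mod m 3; norm_num at this; exact this
  have h7' : ∀ m : Nat, 7 &&& m = m % 8 := fun m => by rw [Nat.and_comm]; exact h7 m
  unfold PySem.Int.band
  simp only [show Int.toNat 7 = 7 from rfl, h7, h7']
  norm_num
  split_ifs with h1 <;> omega

-- Python a & 0xFFFFFF is a % 2^24
theorem pv_band_mask24 (a : Int) : PySem.Int.band a 16777215 = a % 16777216 := by
  have h7 : ∀ m : Nat, m &&& 16777215 = m % 16777216 := fun m => by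
    have := Nat.and_two_pow_sub_one_eq_mod m 24; norm_num at this; exact this
  have h7' : ∀ m : Nat, 16777215 &&& m = m % 16777216 := fun m => by rw [Nat.and_comm]; exact h7 m
  unfold PySem.Int.band
  simp only [show Int.toNat 16777215 = 16777215 from rfl, h7, h7']
  norm_num
  split_ifs with h1 <;> omega

-- width-w zero-padded octal digits, as structural recursion on the width
def pvPadOct : Nat → Nat → List Char
  | 0, _ => []
  | w + 1, n => pvPadOct w (n / 8) ++ [Char.ofNat (48 + n % 8)]

theorem pvPadOct_zero (w : Nat) : pvPadOct w 0 = List.replicate w '0' := by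
  induction w with
  | zero => rfl
  | succ w ih => simp [pvPadOct, ih, List.replicate_succ']

theorem pvOctDigits_len_le (w n : Nat) (h : n < 8 ^ w) (hw : 1 ≤ w) : (pvOctDigits n).length ≤ w := by
  induction w generalizing n with
  | zero => omega
  | succ w ih =>
    rw [pvOctDigits]
    split_ifs with h8
    · simp
    · have hw1 : 1 ≤ w := by
        by_contra hc
        have hw0 : w = 0 := by omega
        subst hw0; norm_num at h; omega
      have := ih (n / 8) ((Nat.div_lt_iff_lt_mul (by norm_num)).mpr (by rw [← pow_succ]; exact h)) hw1
      simp [this]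

-- the padded digit list of A's source is exactly the width-w recursion
theorem pvPad_eq (w n : Nat) (h : n < 8 ^ w) (hw : 1 ≤ w) :
    List.replicate (w - (pvOctDigits n).length) '0' ++ pvOctDigits n = pvPadOct w n := by
  induction w generalizing n with
  | zero => omega
  | succ w ih =>
    rw [pvOctDigits]
    split_ifs with h8
    · rcases Nat.eq_zero_or_pos w with rfl | hw1
      · simp [pvPadOct, Nat.mod_eq_of_lt h8]
      · simp only [List.length_cons, List.length_nil]
        rw [pvPadOct, Nat.div_eq_of_lt h8, Nat.mod_eq_of_lt h8, pvPadOct_zero]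
        simp
    · have hw1 : 1 ≤ w := by
        by_contra hc
        have hw0 : w = 0 := by omega
        subst hw0; norm_num at h; omega
      have hlt : n / 8 < 8 ^ w := (Nat.div_lt_iff_lt_mul (by norm_num)).mpr (by rw [← pow_succ]; exact h)
      have hlen := pvOctDigits_len_le w (n / 8) hlt hw1
      rw [pvPadOct, ← ih (n / 8) hlt hw1]
      simp only [List.length_append, List.length_cons, List.length_nil]
      rw [show w + 1 - ((pvOctDigits (n / 8)).length + (0 + 1)) = w - (pvOctDigits (n / 8)).length by omega]
      simp

-- int(c) - style digit read-back of an octal digit character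
theorem pv_digit_mod (m : Nat) : ((Char.ofNat (48 + m % 8)).toNat : Int) - 48 = ((m % 8 : Nat) : Int) := by
  have h : m % 8 < 8 := Nat.mod_lt _ (by norm_num)
  interval_cases hm : (m % 8) <;> decide

-- the chunk-extraction phases of the two ports agree for EVERY integer
theorem pv_extract_eq (d : Int) :
    (((PySem.List.pyRange 0 8 1).foldl
      (fun (s : List Int × Int) _ => (s.1 ++ [PySem.Int.band s.2 7], s.2 >>> (3:Nat))) ([], d)).1).reverse
    = (pvOct8 (PySem.Int.band d 0xFFFFFF).toNat).map (fun c => ((c.toNat : Int) - 48)) := by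
  have hM : (PySem.Int.band d 0xFFFFFF).toNat < 8 ^ 8 := by
    rw [show (0xFFFFFF : Int) = 16777215 from rfl, pv_band_mask24]
    have := Int.emod_lt_of_pos d (show (0:Int) < 16777216 by norm_num)
    omega
  rw [show (0xFFFFFF : Int) = 16777215 from rfl] at *
  rw [pvOct8, pvPad_eq 8 _ hM (by norm_num)]
  rw [show PySem.List.pyRange 0 8 1 = [0,1,2,3,4,5,6,7] from by decide]
  simp only [List.foldl, pvPadOct, List.map_cons, List.map_nil, List.nil_append, List.cons_append,
    List.reverse_cons, List.reverse_nil, pv_digit_mod, pv_band_seven, Int.shiftRight_eq_div_pow,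
    pv_band_mask24]
  norm_num
  refine ⟨?_, ?_, ?_, ?_, ?_, ?_, ?_, ?_⟩ <;> omega

theorem pv_ab (bytearr : List Int) : bytes_to_3_bit_chunks bytearr = bytes_to_3_bit_chunks_alt bytearr := by
  unfold bytes_to_3_bit_chunks bytes_to_3_bit_chunks_alt big_endian_to_int
  exact pv_extract_eq _

-- ===== VERDICT (by name: the statement is the Claim_ definition above) =====
theorem bytes_to_3_bit_chunks_spec : Claim_equal_bytes_to_3_bit_chunks := by
  intro bytearr _
  unfold Spec_bytes_to_3_bit_chunks
  exact pv_ab bytearr
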